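-- pv_equiv track=rewrite | github.com/demichie/MrLavaLoba2 | PYTHON/EXAMPLES/ETNA_LFS1/mr_lava_loba.py | count_descendants
-- ===== SOURCE A (Python) =====
-- from collections import defaultdict
--
-- def count_descendants(tree):
--     # Step 1: Build the tree from the parent-child dictionary
--     children = defaultdict(list)
--     for node, parent in tree.items():
--         children[parent].append(node)
--
--     # Step 2: Define a recursive function to count descendants
--     def count(node):
--         total = 0
--         for child in children[node]:
--             total += 1 + count(child)
--         return total
--
--     # Create a dictionary to hold the descendant counts
--     descendant_counts = {}
--     for node in tree:
--         descendant_counts[node] = count(node)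
--
--     return descendant_counts
-- ===== SOURCE B (Python) =====
-- def count_descendants(tree):
--     # Iterative level-by-level (breadth-first) accumulation instead of per-node recursion.
--     children = {}
--     for node, parent in tree.items():
--         children.setdefault(parent, []).append(node)
--     counts = {}
--     for node in tree:
--         total = 0
--         frontier = [node]
--         while frontier:
--             nxt = []
--             for v in frontier:
--                 kids = children.get(v, [])
--                 total += len(kids)
--                 nxt.extend(kids)
--             frontier = nxt
--         counts[node] = total
--     return counts
-- ===== Notes on version B (the rewrite author's own statement) =====
-- stated objective: alternative
-- what changed: Replaces A's per-node recursive descendant count with an iterative level-by-level frontier expansion that sums child counts per level; Pre_ excludes cyclic parent maps, on which A raises RecursionError (and B would loop).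
import Mathlib
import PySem

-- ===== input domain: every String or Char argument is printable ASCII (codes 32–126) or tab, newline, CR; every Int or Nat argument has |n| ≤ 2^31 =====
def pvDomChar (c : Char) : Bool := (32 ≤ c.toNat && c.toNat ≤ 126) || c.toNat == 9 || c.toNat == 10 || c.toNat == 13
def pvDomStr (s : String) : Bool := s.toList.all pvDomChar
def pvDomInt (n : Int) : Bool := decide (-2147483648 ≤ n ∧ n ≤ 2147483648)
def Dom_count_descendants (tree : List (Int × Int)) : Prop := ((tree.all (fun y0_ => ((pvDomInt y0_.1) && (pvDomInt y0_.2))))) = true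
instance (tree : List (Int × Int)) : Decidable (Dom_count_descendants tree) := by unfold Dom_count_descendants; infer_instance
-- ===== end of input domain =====

-- B replaces A's per-node recursion by an iterative level-by-level frontier expansion (alternative
-- decomposition, same cost); equivalence of the RETURN value is proved on acyclic parent maps (Pre_).

-- ===== PORT A =====
-- children["parent"].append(node) loop, shared by both ports: A writes it with defaultdict(list),
-- B with setdefault(parent, []); both are exactly Dict.modify parent [] (· ++ [node])
def pvChildren (tree : List (Int × Int)) : PySem.Dict Int (List Int) :=
  tree.foldl (fun d p => d.modify p.2 [] (· ++ [p.1])) PySem.Dict.empty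

-- def count(node): total = 0; for child in children[node]: total += 1 + count(child); return total
-- fuel makes the Python recursion total; fuel = len(tree)+1 covers every acyclic input (Pre_)
def pvCountA (ch : PySem.Dict Int (List Int)) : Nat → Int → Int
  | 0, _ => 0
  | f + 1, node => (ch.getD node []).foldl (fun total child => total + (1 + pvCountA ch f child)) 0

def count_descendants (tree : List (Int × Int)) : List (Int × Int) :=
  let children := pvChildren tree
  (tree.foldl (fun d p => d.insert p.1 (pvCountA children (tree.length + 1) p.1))
    PySem.Dict.empty).items

-- ===== PORT B =====

-- one pass of the for-v-in-frontier loop: accumulates total and nxt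
def pvLevel (ch : PySem.Dict Int (List Int)) (frontier : List Int) (total : Int) :
    Int × List Int :=
  frontier.foldl (fun acc v => (acc.1 + PySem.List.len (ch.getD v []), acc.2 ++ ch.getD v []))
    (total, [])

-- while frontier: … ; fuel makes the loop total; fuel = len(tree)+1 covers every acyclic input
def pvBFS (ch : PySem.Dict Int (List Int)) : Nat → List Int → Int → Int
  | 0, _, total => total
  | f + 1, frontier, total =>
    if frontier.isEmpty then total
    else
      let s := pvLevel ch frontier total
      pvBFS ch f s.2 s.1

def count_descendants_alt (tree : List (Int × Int)) : List (Int × Int) :=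
  let children := pvChildren tree
  (tree.foldl (fun d p => d.insert p.1 (pvBFS children (tree.length + 1) [p.1] 0))
    PySem.Dict.empty).items

-- ===== PRECONDITION & SPEC =====
-- one step up the parent map (first-match lookup, like the Python dict)
def pvParentStep (tree : List (Int × Int)) : Option Int → Option Int
  | none => none
  | some k => List.lookup k tree

-- Pre_ excludes cyclic parent maps: there Python A raises RecursionError (and B's while loop
-- would not terminate). Acyclicity is stated as: from every key, following parents leaves the
-- key set within len(tree)+1 steps.
def Pre_count_descendants (tree : List (Int × Int)) : Prop :=
  ∀ p ∈ tree, (pvParentStep tree)^[tree.length + 1] (some p.1) = none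
instance (tree : List (Int × Int)) : Decidable (Pre_count_descendants tree) := by
  unfold Pre_count_descendants; infer_instance

def pvWitness_count_descendants : (List (Int × Int)) := [(2, 1), (3, 1), (1, 0)]

def Spec_count_descendants (tree : List (Int × Int)) (out : List (Int × Int)) : Prop := out = count_descendants_alt tree
instance (tree : List (Int × Int)) (out : List (Int × Int)) : Decidable (Spec_count_descendants tree out) := by unfold Spec_count_descendants; infer_instance

-- ===== CLAIM (what is proved, stated in full; the proofs are below) =====
def Claim_equal_count_descendants : Prop := ∀ (tree : List (Int × Int)), Dom_count_descendants tree → Pre_count_descendants tree → Spec_count_descendants tree (count_descendants tree)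

-- ===== LEMMAS AND PROOFS =====

-- the inner for-loop of B: running total plus per-level sums, frontier becomes the flatMap of kids
theorem pvLevel_spec (ch : PySem.Dict Int (List Int)) (frontier : List Int) (total : Int) :
    pvLevel ch frontier total =
      (total + (frontier.map (fun v => PySem.List.len (ch.getD v []))).sum,
        frontier.flatMap (fun v => ch.getD v [])) := by
  suffices h : ∀ (t : Int) (acc : List Int),
      frontier.foldl
          (fun acc v => (acc.1 + PySem.List.len (ch.getD v []), acc.2 ++ ch.getD v [])) (t, acc) =
        (t + (frontier.map (fun v => PySem.List.len (ch.getD v []))).sum,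
          acc ++ frontier.flatMap (fun v => ch.getD v [])) by
    simpa using h total []
  induction frontier with
  | nil => intro t acc; simp
  | cons v vs ih =>
    intro t acc
    rw [List.foldl_cons, ih]
    simp [add_assoc]

-- A's recursive count as a fold: total over kids = len kids + Σ counts
theorem pvCountA_succ (ch : PySem.Dict Int (List Int)) (f : Nat) (node : Int) :
    pvCountA ch (f + 1) node =
      PySem.List.len (ch.getD node []) + ((ch.getD node []).map (pvCountA ch f)).sum := by
  show (ch.getD node []).foldl (fun total child => total + (1 + pvCountA ch f child)) 0 = _
  rw [PySem.List.foldl_add (g := fun child => 1 + pvCountA ch f child)]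
  rw [show (fun child => (1 : Int) + pvCountA ch f child) =
        (fun child => (fun _ : Int => (1 : Int)) child + pvCountA ch f child) from rfl]
  rw [PySem.List.sum_map_add_int, PySem.List.sum_map_const_int]
  simp [PySem.List.len_eq]

-- B's level loop computes, for any fuel, the sum of A's fuelled counts over the frontier
theorem pvBFS_eq_sum (ch : PySem.Dict Int (List Int)) :
    ∀ (f : Nat) (frontier : List Int) (total : Int),
      pvBFS ch f frontier total = total + (frontier.map (pvCountA ch f)).sum := by
  intro f
  induction f with
  | zero =>
    intro frontier total
    simp [pvBFS, pvCountA, List.map_const']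
  | succ f ih =>
    intro frontier total
    rw [pvBFS]
    by_cases h : frontier = []
    · simp [h]
    · rw [if_neg (by simpa using h), pvLevel_spec, ih]
      dsimp only
      rw [List.map_flatMap, List.flatMap_def, List.sum_flatten, List.map_map]
      have hmap : frontier.map (pvCountA ch (f + 1)) =
          frontier.map (fun v =>
            PySem.List.len (ch.getD v []) + ((ch.getD v []).map (pvCountA ch f)).sum) :=
        List.map_congr_left (fun v _ => pvCountA_succ ch f v)
      rw [hmap, PySem.List.sum_map_add_int]
      simp only [Function.comp_def]
      ring

-- ===== VERDICT (by name: the statement is the Claim_ definition above) =====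
-- two folds with pointwise-equal step functions agree
theorem pvFoldlFunCongr {α β : Type} (f g : α → β → α) (h : ∀ d p, f d p = g d p) :
    ∀ (l : List β) (init : α), l.foldl f init = l.foldl g init := by
  intro l
  induction l with
  | nil => intro init; rfl
  | cons p ps ih => intro init; rw [List.foldl_cons, List.foldl_cons, h, ih]

theorem count_descendants_spec : Claim_equal_count_descendants := by
  intro tree _ _
  show count_descendants tree = count_descendants_alt tree
  have hv : ∀ (d : PySem.Dict Int Int) (p : Int × Int),
      d.insert p.1 (pvCountA (pvChildren tree) (tree.length + 1) p.1) =
      d.insert p.1 (pvBFS (pvChildren tree) (tree.length + 1) [p.1] 0) := by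
    intro d p
    rw [pvBFS_eq_sum]
    simp
  exact congrArg (fun d : PySem.Dict Int Int => d.items)
    (pvFoldlFunCongr _ _ hv tree PySem.Dict.empty)
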